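-- pv_equiv track=rewrite | github.com/hafizna/base_ai_tfa | core/fault_detector.py | _normalize_fault_phase_list
-- ===== SOURCE A (Python) =====
-- from typing import Optional, List
--
-- def _normalize_fault_phase_list(phases: Optional[List[str]]) -> List[str]:
--     """Keep only active phase labels in stable A/B/C order."""
--     order = {"A": 0, "B": 1, "C": 2}
--     cleaned = []
--     for ph in phases or []:
--         key = str(ph or "").upper().strip()
--         if key in order and key not in cleaned:
--             cleaned.append(key)
--     return sorted(cleaned, key=lambda ph: order[ph])
-- ===== SOURCE B (Python) =====
-- from typing import Optional, List
--
-- def _normalize_fault_phase_list(phases: Optional[List[str]]) -> List[str]: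
--     """Keep only active phase labels in stable A/B/C order."""
--     src = phases or []
--     return [label for label in ("A", "B", "C")
--             if any(str(ph or "").upper().strip() == label for ph in src)]
-- ===== Notes on version B (the rewrite author's own statement) =====
-- stated objective: alternative
-- what changed: Inverts the loop structure: instead of A's single input pass that dedups into an accumulator list and then key-sorts it, B loops over the fixed canonical template of the three phase labels and for each label does an existence scan of the input, so there is no accumulator, no dedup and no sort.
import Mathlib
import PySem

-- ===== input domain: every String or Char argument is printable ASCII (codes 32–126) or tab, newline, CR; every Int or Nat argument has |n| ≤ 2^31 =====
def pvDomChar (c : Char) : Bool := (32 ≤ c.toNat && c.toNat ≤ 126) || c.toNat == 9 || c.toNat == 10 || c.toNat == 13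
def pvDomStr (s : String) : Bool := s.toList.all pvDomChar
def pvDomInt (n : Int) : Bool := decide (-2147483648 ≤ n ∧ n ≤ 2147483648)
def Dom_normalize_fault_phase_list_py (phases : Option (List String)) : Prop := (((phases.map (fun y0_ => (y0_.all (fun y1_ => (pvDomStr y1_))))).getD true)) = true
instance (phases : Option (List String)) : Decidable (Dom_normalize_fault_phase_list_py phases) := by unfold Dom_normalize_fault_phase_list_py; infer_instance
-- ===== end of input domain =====

-- B inverts the loop structure: it iterates the fixed template ["A","B","C"] and keeps each
-- label for which an existence scan of the input finds a matching normalized element, so A's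
-- dedup accumulator and final key-sort disappear (alternative decomposition; same value).

-- ===== PORT A =====
def normalize_fault_phase_list_py (phases : Option (List String)) : List String :=
  let order : PySem.Dict String Int := PySem.Dict.ofList [("A", 0), ("B", 1), ("C", 2)]
  let cleaned := (phases.getD []).foldl (fun cleaned ph =>
    let key := PySem.Str.strip (PySem.Str.upper (if ph == "" then "" else ph))
    if (PySem.Dict.get? order key).isSome && !(cleaned.contains key) then cleaned ++ [key]
    else cleaned) []
  -- order[ph] never raises here: every element of cleaned is a key of order, so getD is exact
  PySem.List.sorted cleaned (fun ph => PySem.Dict.getD order ph 0) false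

-- ===== PORT B =====
def normalize_fault_phase_list_py_alt (phases : Option (List String)) : List String :=
  let src := phases.getD []
  ["A", "B", "C"].filter (fun label =>
    src.any (fun ph => PySem.Str.strip (PySem.Str.upper (if ph == "" then "" else ph)) == label))

-- ===== PRECONDITION & SPEC =====
def Spec_normalize_fault_phase_list_py (phases : Option (List String)) (out : List String) : Prop := out = normalize_fault_phase_list_py_alt phases
instance (phases : Option (List String)) (out : List String) : Decidable (Spec_normalize_fault_phase_list_py phases out) := by unfold Spec_normalize_fault_phase_list_py; infer_instance

-- ===== CLAIM (what is proved, stated in full; the proofs are below) =====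
def Claim_equal_normalize_fault_phase_list_py : Prop := ∀ (phases : Option (List String)), Dom_normalize_fault_phase_list_py phases → Spec_normalize_fault_phase_list_py phases (normalize_fault_phase_list_py phases)

-- ===== LEMMAS AND PROOFS =====

-- the shared normalization str(ph or "").upper().strip()
def pvNorm (ph : String) : String := PySem.Str.strip (PySem.Str.upper (if ph == "" then "" else ph))

def pvOrder : PySem.Dict String Int := PySem.Dict.ofList [("A", 0), ("B", 1), ("C", 2)]

def pvStepA (cleaned : List String) (ph : String) : List String :=
  if (PySem.Dict.get? pvOrder (pvNorm ph)).isSome && !(cleaned.contains (pvNorm ph)) then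
    cleaned ++ [pvNorm ph] else cleaned

lemma get?_order_isSome (k : String) :
    (PySem.Dict.get? pvOrder k).isSome = (k == "A" || k == "B" || k == "C") := by
  by_cases h1 : k = "A"
  · subst h1; decide
  by_cases h2 : k = "B"
  · subst h2; decide
  by_cases h3 : k = "C"
  · subst h3; decide
  have e1 : (k == "A") = false := beq_false_of_ne h1
  have e2 : (k == "B") = false := beq_false_of_ne h2
  have e3 : (k == "C") = false := beq_false_of_ne h3
  have e1' : ("A" == k) = false := beq_false_of_ne (fun h => h1 h.symm)
  have e2' : ("B" == k) = false := beq_false_of_ne (fun h => h2 h.symm)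
  have e3' : ("C" == k) = false := beq_false_of_ne (fun h => h3 h.symm)
  have hmk : pvOrder = PySem.Dict.mk [("A", 0), ("B", 1), ("C", 2)] := by decide
  simp [hmk, PySem.Dict.get?, e1, e2, e3, e1', e2', e3']

lemma portA_eq (phases : Option (List String)) : normalize_fault_phase_list_py phases =
    PySem.List.sorted ((phases.getD []).foldl pvStepA []) (fun ph => PySem.Dict.getD pvOrder ph 0) false := by
  unfold normalize_fault_phase_list_py pvStepA pvNorm pvOrder
  rfl

lemma portB_eq (phases : Option (List String)) : normalize_fault_phase_list_py_alt phases =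
    ["A", "B", "C"].filter (fun label => (phases.getD []).any (fun ph => pvNorm ph == label)) := by
  unfold normalize_fault_phase_list_py_alt pvNorm
  rfl

lemma foldA_spec (xs : List String) : ∀ acc : List String, acc.Nodup →
    (xs.foldl pvStepA acc).Nodup ∧
    (∀ x, x ∈ xs.foldl pvStepA acc ↔
      x ∈ acc ∨ ((x = "A" ∨ x = "B" ∨ x = "C") ∧ ∃ ph ∈ xs, pvNorm ph = x)) := by
  induction xs with
  | nil =>
    intro acc h
    refine ⟨h, fun x => ?_⟩
    simp only [List.foldl_nil, List.not_mem_nil]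
    constructor
    · exact fun hx => Or.inl hx
    · rintro (hx | ⟨_, _, ⟨⟩, _⟩); exact hx
  | cons a t ih =>
    intro acc hnd
    by_cases hc : ((PySem.Dict.get? pvOrder (pvNorm a)).isSome && !(acc.contains (pvNorm a))) = true
    · have hvalid : pvNorm a = "A" ∨ pvNorm a = "B" ∨ pvNorm a = "C" := by
        have h := (Bool.and_eq_true _ _ ▸ hc).1
        rw [get?_order_isSome] at h
        rcases Bool.or_eq_true_iff.mp h with h' | h'
        · rcases Bool.or_eq_true_iff.mp h' with h'' | h''
          · exact Or.inl (eq_of_beq h'')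
          · exact Or.inr (Or.inl (eq_of_beq h''))
        · exact Or.inr (Or.inr (eq_of_beq h'))
      have hnotin : pvNorm a ∉ acc := by
        have h := (Bool.and_eq_true _ _ ▸ hc).2
        rw [Bool.not_eq_eq_eq_not, Bool.not_true, List.contains_eq_mem,
          decide_eq_false_iff_not] at h
        exact h
      have hacc' : (acc ++ [pvNorm a]).Nodup := by
        refine List.Nodup.append hnd (List.nodup_singleton _) ?_
        intro x hx hx'
        rw [List.mem_singleton] at hx'
        exact hnotin (hx' ▸ hx)
      have hA : pvStepA acc a = acc ++ [pvNorm a] := by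
        unfold pvStepA; rw [if_pos hc]
      obtain ⟨h1, h2⟩ := ih (acc ++ [pvNorm a]) hacc'
      rw [List.foldl_cons, hA]
      refine ⟨h1, fun x => ?_⟩
      rw [h2 x]
      simp only [List.mem_append, List.mem_cons, List.not_mem_nil, or_false]
      constructor
      · rintro ((h | rfl) | ⟨hx, ph, hph, hn⟩)
        · exact Or.inl h
        · exact Or.inr ⟨hvalid, a, Or.inl rfl, rfl⟩
        · exact Or.inr ⟨hx, ph, Or.inr hph, hn⟩
      · rintro (h | ⟨hx, ph, (rfl | hph), hn⟩)
        · exact Or.inl (Or.inl h)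
        · exact Or.inl (Or.inr hn.symm)
        · exact Or.inr ⟨hx, ph, hph, hn⟩
    · have hA : pvStepA acc a = acc := by
        unfold pvStepA; rw [if_neg hc]
      obtain ⟨h1, h2⟩ := ih acc hnd
      rw [List.foldl_cons, hA]
      refine ⟨h1, fun x => ?_⟩
      rw [h2 x]
      constructor
      · rintro (h | ⟨hx, ph, hph, hn⟩)
        · exact Or.inl h
        · exact Or.inr ⟨hx, ph, List.mem_cons_of_mem _ hph, hn⟩
      · rintro (h | ⟨hx, ph, hph, hn⟩)
        · exact Or.inl h
        rcases List.mem_cons.mp hph with rfl | hph'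
        · -- the skipped element: the guard was false, so pvNorm a is invalid or already in acc
          left
          have hvalid : ((PySem.Dict.get? pvOrder (pvNorm ph)).isSome) = true := by
            rw [get?_order_isSome, hn]
            rcases hx with rfl | rfl | rfl <;> decide
          have hcon : acc.contains (pvNorm ph) = true := by
            by_contra hb
            rw [Bool.not_eq_true] at hb
            apply hc
            rw [Bool.and_eq_true]
            refine ⟨hvalid, ?_⟩
            rw [hb]
            rfl
          rw [List.contains_eq_mem, decide_eq_true_eq] at hcon
          exact hn ▸ hcon
        · exact Or.inr ⟨hx, ph, hph', hn⟩

lemma template_nodup : (["A", "B", "C"] : List String).Nodup := by decide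

lemma template_pairwise :
    (["A", "B", "C"] : List String).Pairwise
      (fun a b => PySem.Dict.getD pvOrder a 0 < PySem.Dict.getD pvOrder b 0) := by decide

-- ===== VERDICT (by name: the statement is the Claim_ definition above) =====
theorem normalize_fault_phase_list_py_spec : Claim_equal_normalize_fault_phase_list_py := by
  intro phases _
  unfold Spec_normalize_fault_phase_list_py
  rw [portA_eq, portB_eq]
  obtain ⟨hnd, hmemA⟩ := foldA_spec (phases.getD []) [] List.nodup_nil
  apply PySem.List.sorted_eq_of_perm_of_pairwise_lt
  · -- B's template-filter list is a permutation of A's deduped list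
    rw [List.perm_ext_iff_of_nodup (List.Nodup.filter _ template_nodup) hnd]
    intro x
    rw [hmemA x, List.mem_filter, List.any_eq_true]
    constructor
    · rintro ⟨ht, ph, hph, he⟩
      refine Or.inr ⟨?_, ph, hph, eq_of_beq he⟩
      rcases List.mem_cons.mp ht with rfl | ht'
      · exact Or.inl rfl
      rcases List.mem_cons.mp ht' with rfl | ht''
      · exact Or.inr (Or.inl rfl)
      rcases List.mem_cons.mp ht'' with rfl | ht'''
      · exact Or.inr (Or.inr rfl)
      · exact absurd ht''' List.not_mem_nil
    · rintro (h | ⟨hv, ph, hph, hn⟩)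
      · exact absurd h List.not_mem_nil
      refine ⟨?_, ph, hph, beq_of_eq hn⟩
      rcases hv with rfl | rfl | rfl <;> decide
  · exact List.Pairwise.filter _ template_pairwise
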